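-- pv_equiv track=rewrite | github.com/seeu359/OOP_course | oop/part_1/class_and_static_methods/card_check.py | check_card_number
-- ===== SOURCE A (Python) =====
-- from string import ascii_lowercase, digits
--
-- def check_card_number(number: str) -> bool:
--     if len(number.replace('-', '')) != 16:
--         return False
--     split_number = list(map(lambda x: x.strip(digits), number.split('-')))
--     if len(split_number) != 4:
--         return False
--     bool_list = [True if len(chunk) == 0 else False
--                  for chunk in split_number]
--     return all(bool_list)
-- ===== SOURCE B (Python) =====
-- from string import digits
--
-- def check_card_number(number: str) -> bool:
--     if number.count('-') != 3:
--         return False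
--     stripped = number.replace('-', '')
--     return len(stripped) == 16 and all(c in digits for c in stripped)
-- ===== Notes on version B (the rewrite author's own statement) =====
-- stated objective: simpler
-- what changed: B validates the whole string at once - dash count == 3, then one digit-membership pass over the dash-free remainder - instead of A's split into chunks, per-chunk strip(digits), boolean-list comprehension and all().
import Mathlib
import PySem

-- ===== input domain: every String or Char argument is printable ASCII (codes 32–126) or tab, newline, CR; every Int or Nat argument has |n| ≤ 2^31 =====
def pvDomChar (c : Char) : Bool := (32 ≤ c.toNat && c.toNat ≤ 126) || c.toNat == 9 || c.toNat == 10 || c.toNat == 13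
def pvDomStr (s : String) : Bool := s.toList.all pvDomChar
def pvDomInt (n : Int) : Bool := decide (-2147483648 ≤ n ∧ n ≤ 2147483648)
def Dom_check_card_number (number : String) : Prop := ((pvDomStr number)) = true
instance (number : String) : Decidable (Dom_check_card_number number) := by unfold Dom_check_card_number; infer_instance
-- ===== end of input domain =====

-- B validates the whole string at once (dash count, then one digit-membership pass over the
-- dash-free remainder) instead of A's split + per-chunk strip(digits) + boolean list + all; same cost.


-- string.digits, as a character list
def pvDigits : List Char := ['0','1','2','3','4','5','6','7','8','9']

-- ===== PORT A =====
-- split and per-chunk strip are ported at the Chars (List Char) level, the exact core of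
-- PySem.Str.split?/stripChars for the nonempty separator "-".
def check_card_number (number : String) : Bool :=
  if PySem.Str.len (PySem.Str.replace number "-" "") ≠ 16 then false
  else
    let split_number := (PySem.Chars.splitOn number.toList ['-']).map
      (fun x => PySem.Chars.stripChars x pvDigits)
    if split_number.length ≠ 4 then false
    else
      let bool_list := split_number.map (fun chunk => if chunk.length = 0 then true else false)
      bool_list.all id

-- ===== PORT B =====
-- `c in digits` for a single character c is exactly list membership in pvDigits.
def check_card_number_alt (number : String) : Bool :=
  if PySem.Str.count number "-" ≠ 3 then false
  else
    let stripped := PySem.Str.replace number "-" ""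
    PySem.Str.len stripped == 16 && stripped.toList.all (fun c => pvDigits.contains c)

-- ===== PRECONDITION & SPEC =====
def Spec_check_card_number (number : String) (out : Bool) : Prop := out = check_card_number_alt number
instance (number : String) (out : Bool) : Decidable (Spec_check_card_number number out) := by unfold Spec_check_card_number; infer_instance

-- ===== CLAIM (what is proved, stated in full; the proofs are below) =====
def Claim_equal_check_card_number : Prop := ∀ (number : String), Dom_check_card_number number → Spec_check_card_number number (check_card_number number)

-- ===== LEMMAS AND PROOFS =====

-- replace '-' by '' is filtering the dashes out
theorem replace_go_dash (fuel : Nat) : ∀ (l acc : List Char), l.length ≤ fuel →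
    PySem.Chars.replace.go ['-'] [] fuel l acc
      = acc.reverse ++ l.filter (fun c => !('-' == c)) := by
  induction fuel with
  | zero => intro l acc h; cases l with
    | nil => simp [PySem.Chars.replace.go]
    | cons c t => simp at h
  | succ n ih =>
    intro l acc h
    cases l with
    | nil => simp [PySem.Chars.replace.go]
    | cons c t =>
      have hlen : t.length ≤ n := by simpa using Nat.le_of_succ_le_succ h
      simp only [PySem.Chars.replace.go, List.isPrefixOf, Bool.and_true]
      by_cases hc : c = '-'
      · subst hc
        rw [if_pos (by decide)]
        simp only [List.length_singleton, List.drop_succ_cons, List.drop_zero,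
          List.reverse_nil, List.nil_append]
        rw [ih _ _ hlen]
        simp
      · rw [if_neg (by simp [Ne.symm hc])]
        rw [ih _ _ hlen]
        simp [Ne.symm hc]

theorem replace_dash (s : List Char) :
    PySem.Chars.replace s ['-'] [] = s.filter (fun c => !('-' == c)) := by
  simp [PySem.Chars.replace, replace_go_dash s.length s [] (le_refl _)]

-- count '-' is countP
theorem count_go_dash (fuel : Nat) : ∀ (l : List Char) (acc : Nat), l.length ≤ fuel →
    PySem.Chars.count.go ['-'] fuel l acc = acc + l.countP (fun c => '-' == c) := by
  induction fuel with
  | zero => intro l acc h; cases l with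
    | nil => simp [PySem.Chars.count.go]
    | cons c t => simp at h
  | succ n ih =>
    intro l acc h
    cases l with
    | nil => simp [PySem.Chars.count.go]
    | cons c t =>
      have hlen : t.length ≤ n := by simpa using Nat.le_of_succ_le_succ h
      simp only [PySem.Chars.count.go, List.isPrefixOf, Bool.and_true]
      by_cases hc : c = '-'
      · subst hc
        rw [if_pos (by decide)]
        simp only [List.length_singleton, List.drop_succ_cons, List.drop_zero]
        rw [ih _ _ hlen]
        simp; omega
      · rw [if_neg (by simp [Ne.symm hc])]
        rw [ih _ _ hlen]
        simp [Ne.symm hc]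

theorem count_dash (s : List Char) :
    PySem.Chars.count s ['-'] = s.countP (fun c => '-' == c) := by
  simp [PySem.Chars.count, count_go_dash s.length s 0 (le_refl _)]

-- split on '-' as a simple structural function
def splitDash : List Char → List Char → List (List Char)
  | [], cur => [cur.reverse]
  | c :: t, cur => if ('-' == c) = true then cur.reverse :: splitDash t [] else splitDash t (c :: cur)

theorem splitOn_go_dash (fuel : Nat) : ∀ (l cur : List Char) (acc : List (List Char)),
    l.length ≤ fuel →
    PySem.Chars.splitOn.go ['-'] fuel l cur acc = acc.reverse ++ splitDash l cur := by
  induction fuel with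
  | zero => intro l cur acc h; cases l with
    | nil => simp [PySem.Chars.splitOn.go, splitDash]
    | cons c t => simp at h
  | succ n ih =>
    intro l cur acc h
    cases l with
    | nil => simp [PySem.Chars.splitOn.go, splitDash]
    | cons c t =>
      have hlen : t.length ≤ n := by simpa using Nat.le_of_succ_le_succ h
      simp only [PySem.Chars.splitOn.go, List.isPrefixOf, Bool.and_true]
      by_cases hc : c = '-'
      · subst hc
        rw [if_pos (by decide)]
        simp only [List.length_singleton, List.drop_succ_cons, List.drop_zero]
        rw [ih _ _ _ hlen]
        simp [splitDash]
      · rw [if_neg (by simp [Ne.symm hc])]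
        rw [ih _ _ _ hlen]
        simp [splitDash, Ne.symm hc]

theorem splitOn_dash (s : List Char) :
    PySem.Chars.splitOn s ['-'] = splitDash s [] := by
  simp [PySem.Chars.splitOn, splitOn_go_dash (s.length + 1) s [] [] (by omega)]

theorem splitDash_length (l : List Char) : ∀ cur,
    (splitDash l cur).length = l.countP (fun c => '-' == c) + 1 := by
  induction l with
  | nil => intro cur; simp [splitDash]
  | cons c t ih =>
    intro cur
    by_cases hc : ('-' == c) = true
    · simp [splitDash, hc, ih]
    · simp only [Bool.not_eq_true] at hc
      simp [splitDash, hc, ih]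

theorem splitDash_all (p : Char → Bool) (l : List Char) : ∀ cur,
    ((splitDash l cur).all (fun ch => ch.all p))
      = (cur.all p && (l.filter (fun c => !('-' == c))).all p) := by
  induction l with
  | nil => intro cur; simp [splitDash]
  | cons c t ih =>
    intro cur
    by_cases hc : ('-' == c) = true
    · simp [splitDash, hc, ih]
    · simp only [splitDash, hc, Bool.false_eq_true, if_false, ih, List.all_cons]
      rw [List.filter_cons, if_pos (by simp [hc])]
      simp only [List.all_cons]
      cases p c <;> cases cur.all p <;> simp

-- pointwise-on-members congruence for List.all
theorem all_congr_mem {α : Type} (l : List α) (p q : α → Bool) (h : ∀ x ∈ l, p x = q x) :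
    l.all p = l.all q := by
  induction l with
  | nil => rfl
  | cons a t ih =>
    simp only [List.all_cons, h a (by simp), ih (fun x hx => h x (by simp [hx]))]

-- all chars of (dropWhile p s) satisfy p iff all chars of s do
theorem all_dropWhile (p : Char → Bool) (s : List Char) :
    (s.dropWhile p).all p = s.all p := by
  induction s with
  | nil => simp
  | cons c t ih =>
    by_cases hc : p c = true
    · simp [hc, ih]
    · simp only [Bool.not_eq_true] at hc
      simp [hc]

-- strip(digits) is empty iff every char is a digit
theorem stripChars_digits_empty (ch : List Char) :
    ((PySem.Chars.stripChars ch pvDigits).length = 0)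
      ↔ ch.all (fun c => pvDigits.contains c) = true := by
  unfold PySem.Chars.stripChars
  rw [List.length_eq_zero_iff, List.reverse_eq_nil_iff, List.dropWhile_eq_nil_iff]
  constructor
  · intro h
    have h2 : ((ch.dropWhile fun c => pvDigits.contains c).reverse.all
        (fun c => pvDigits.contains c)) = true := by
      simp only [List.all_eq_true]; exact h
    rw [List.all_reverse, all_dropWhile] at h2
    exact h2
  · intro h x hx
    have := (List.dropWhile_sublist _).subset (List.mem_reverse.mp hx)
    exact (List.all_eq_true.mp h) x this

-- ===== VERDICT (by name: the statement is the Claim_ definition above) =====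
theorem check_card_number_spec : Claim_equal_check_card_number := by
  intro number _
  unfold Spec_check_card_number check_card_number check_card_number_alt
  have hdl : "-".toList = ['-'] := rfl
  have hel : "".toList = ([] : List Char) := rfl
  simp only [PySem.Str.len_eq, PySem.Str.toList_replace, PySem.Str.count, hdl, hel,
    replace_dash, count_dash, splitOn_dash, List.length_map, splitDash_length]
  by_cases h16 : ((List.filter (fun c => !('-' == c)) number.toList).length : Int) = 16
  · by_cases h3 : List.countP (fun c => '-' == c) number.toList = 3
    · rw [if_neg (by simpa using h16), if_neg (by simp [h3]), if_neg (by simp [h3])]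
      have hb : (((List.filter (fun c => !('-' == c)) number.toList).length : Int) == 16) = true := by
        simpa using h16
      rw [hb, Bool.true_and, List.map_map, List.all_map]
      have hcong : ∀ ch ∈ splitDash number.toList [],
          (id ∘ ((fun chunk : List Char => if chunk.length = 0 then true else false) ∘
            fun x => PySem.Chars.stripChars x pvDigits)) ch
          = (fun ch : List Char => ch.all (fun c => pvDigits.contains c)) ch := by
        intro ch _
        by_cases hch : (PySem.Chars.stripChars ch pvDigits).length = 0
        · simp only [Function.comp_apply, id_eq, if_pos hch]
          exact ((stripChars_digits_empty ch).mp hch).symm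
        · have h2 : ¬ ch.all (fun c => pvDigits.contains c) = true := fun hcc =>
            hch ((stripChars_digits_empty ch).mpr hcc)
          simp only [Bool.not_eq_true] at h2
          simp only [Function.comp_apply, id_eq, if_neg hch]
          exact h2.symm
      rw [all_congr_mem _ _ _ hcong, splitDash_all]
      simp
    · rw [if_neg (by simpa using h16), if_pos (by simp [h3]), if_pos (by simp [h3])]
  · rw [if_pos (by simpa using h16)]
    have hb : (((List.filter (fun c => !('-' == c)) number.toList).length : Int) == 16) = false := by
      simpa using h16
    rw [hb, Bool.false_and]
    split <;> rfl
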